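-- pv_equiv track=rewrite | github.com/svgbogdnn/admin-panel | backend/app/api/v1/analytics.py | _streak_absent
-- ===== SOURCE A (Python) =====
-- from typing import Dict, List, Optional, Tuple
--
-- def _streak_absent(statuses: List[str]) -> int:
--     streak = 0
--     for s in reversed(statuses):
--         if (s or "").lower().strip() == "absent":
--             streak += 1
--         else:
--             break
--     return streak
-- ===== SOURCE B (Python) =====
-- from typing import List
--
-- def _streak_absent(statuses: List[str]) -> int:
--     run = 0
--     for s in statuses:
--         if (s or "").lower().strip() == "absent":
--             run += 1
--         else:
--             run = 0
--     return run
-- ===== Notes on version B (the rewrite author's own statement) =====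
-- stated objective: alternative
-- what changed: Replaced the reversed iteration with an early break by a single forward pass keeping a reset-on-mismatch run counter.
import Mathlib
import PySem

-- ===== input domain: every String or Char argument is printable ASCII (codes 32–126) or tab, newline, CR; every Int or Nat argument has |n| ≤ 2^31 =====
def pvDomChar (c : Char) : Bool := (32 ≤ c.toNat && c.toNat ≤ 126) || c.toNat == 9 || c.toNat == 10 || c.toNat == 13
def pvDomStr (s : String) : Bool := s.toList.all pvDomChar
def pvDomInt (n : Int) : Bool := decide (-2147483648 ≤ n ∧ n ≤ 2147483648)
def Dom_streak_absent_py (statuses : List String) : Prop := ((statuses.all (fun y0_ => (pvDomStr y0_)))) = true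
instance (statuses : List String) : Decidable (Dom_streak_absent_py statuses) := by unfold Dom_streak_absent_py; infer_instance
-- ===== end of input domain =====

-- B replaces A's reversed iteration + break by a forward pass with a reset-on-mismatch run counter; same return value.

-- the shared normalisation: (s or "").lower().strip() == "absent"  ((s or "") = s for strings)
def pvIsAbsent (s : String) : Bool := PySem.Str.strip (PySem.Str.lower s) == "absent"

-- ===== PORT A =====
-- the 'for s in reversed(statuses)' loop with break, as structural recursion on the reversed list
def pvALoop : List String → Int → Int
  | [], streak => streak
  | s :: rest, streak => if pvIsAbsent s then pvALoop rest (streak + 1) else streak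

def streak_absent_py (statuses : List String) : Int := pvALoop statuses.reverse 0

-- ===== PORT B =====
def streak_absent_py_alt (statuses : List String) : Int :=
  statuses.foldl (fun run s => if pvIsAbsent s then run + 1 else 0) 0

-- ===== PRECONDITION & SPEC =====
def Spec_streak_absent_py (statuses : List String) (out : Int) : Prop := out = streak_absent_py_alt statuses
instance (statuses : List String) (out : Int) : Decidable (Spec_streak_absent_py statuses out) := by unfold Spec_streak_absent_py; infer_instance

-- ===== CLAIM (what is proved, stated in full; the proofs are below) =====
def Claim_equal_streak_absent_py : Prop := ∀ (statuses : List String), Dom_streak_absent_py statuses → Spec_streak_absent_py statuses (streak_absent_py statuses)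

-- ===== LEMMAS AND PROOFS =====

-- leading-absent count (what pvALoop adds to its accumulator)
def pvCnt : List String → Int
  | [] => 0
  | s :: rest => if pvIsAbsent s then 1 + pvCnt rest else 0

theorem pvALoop_eq_cnt (l : List String) (k : Int) : pvALoop l k = k + pvCnt l := by
  induction l generalizing k with
  | nil => simp [pvALoop, pvCnt]
  | cons s rest ih =>
    simp only [pvALoop, pvCnt]
    split_ifs with h
    · rw [ih]; ring
    · ring

theorem pvCnt_append (l m : List String) :
    pvCnt (l ++ m) = if l.all pvIsAbsent then (l.length : Int) + pvCnt m else pvCnt l := by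
  induction l with
  | nil => simp
  | cons s rest ih =>
    simp only [List.cons_append, pvCnt, List.all_cons]
    by_cases h : pvIsAbsent s = true
    · simp [h, ih]
      split_ifs <;> omega
    · simp [h]

theorem pvFoldl_eq (l : List String) (r : Int) :
    l.foldl (fun run s => if pvIsAbsent s then run + 1 else 0) r
      = if l.all pvIsAbsent then r + (l.length : Int) else pvCnt l.reverse := by
  induction l generalizing r with
  | nil => simp
  | cons s rest ih =>
    simp only [List.foldl_cons, List.all_cons, List.reverse_cons]
    by_cases h : pvIsAbsent s = true
    · rw [ih]
      by_cases ha : rest.all pvIsAbsent = true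
      · simp [h, ha]; ring
      · simp [h, ha]
        rw [pvCnt_append]
        have : (rest.reverse.all pvIsAbsent) = false := by
          simp only [List.all_reverse]; exact eq_false_of_ne_true ha
        simp [this]
    · rw [ih]
      rw [pvCnt_append]
      by_cases ha : rest.all pvIsAbsent = true
      · have : (rest.reverse.all pvIsAbsent) = true := by
          simp only [List.all_reverse]; exact ha
        simp [h, ha, this, pvCnt]
      · have : (rest.reverse.all pvIsAbsent) = false := by
          simp only [List.all_reverse]; exact eq_false_of_ne_true ha
        simp [h, ha, this]

theorem pvCnt_all (l : List String) (h : l.all pvIsAbsent = true) : pvCnt l = (l.length : Int) := by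
  have := pvCnt_append l []
  simpa [h] using this

-- ===== VERDICT (by name: the statement is the Claim_ definition above) =====
theorem streak_absent_py_spec : Claim_equal_streak_absent_py := by
  intro statuses _
  unfold Spec_streak_absent_py streak_absent_py streak_absent_py_alt
  rw [pvALoop_eq_cnt, pvFoldl_eq]
  by_cases h : statuses.all pvIsAbsent = true
  · have hr : (statuses.reverse.all pvIsAbsent) = true := by
      simp only [List.all_reverse]; exact h
    simp [h, pvCnt_all _ hr]
  · simp [h]
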